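-- pv_equiv track=rewrite | github.com/slaweksystem/map_generator_2D | src/Map/MapHelper.py | get_rotated
-- ===== SOURCE A (Python) =====
-- def get_rotated(coords, rotation):
--
--     newCordX = coords[0]
--     newCordY = coords[1]
--
--     oldCordX = newCordX
--     oldCordY = newCordY
--
--     for _ in range (rotation):
--         newCordX = oldCordY
--         newCordY = -oldCordX
--
--         oldCordX = newCordX
--         oldCordY = newCordY
--
--     return (newCordX, newCordY)
-- ===== SOURCE B (Python) =====
-- def get_rotated(coords, rotation):
--     x, y = coords[0], coords[1]
--     k = rotation % 4 if rotation > 0 else 0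
--     return ((x, y), (y, -x), (-x, -y), (-y, x))[k]
-- ===== Notes on version B (the rewrite author's own statement) =====
-- stated objective: simpler
-- what changed: Replace the repeated 90-degree rotation loop by a rotation%4 lookup into the four possible rotated points (negative rotation keeps the original, as A's empty range does).
import Mathlib
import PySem

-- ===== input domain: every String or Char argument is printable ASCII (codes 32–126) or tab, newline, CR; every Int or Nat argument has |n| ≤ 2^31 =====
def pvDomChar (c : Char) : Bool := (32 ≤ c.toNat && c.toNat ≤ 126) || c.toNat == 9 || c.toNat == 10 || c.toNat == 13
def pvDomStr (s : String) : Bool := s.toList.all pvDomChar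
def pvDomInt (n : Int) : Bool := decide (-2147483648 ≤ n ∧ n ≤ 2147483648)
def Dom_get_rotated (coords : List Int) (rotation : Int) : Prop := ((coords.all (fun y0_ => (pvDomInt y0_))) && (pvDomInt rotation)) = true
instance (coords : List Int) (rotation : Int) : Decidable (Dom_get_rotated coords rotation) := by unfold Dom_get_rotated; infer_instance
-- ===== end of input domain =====

-- ===== PORT A =====
-- B replaces A's repeated-rotation loop by a rotation%4 four-case lookup (objective: simpler).
-- A returns a tuple (x, y); both ports render it as the two-element list [x, y].
def get_rotated (coords : List Int) (rotation : Int) : List Int :=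
  match PySem.List.pyGet? coords 0, PySem.List.pyGet? coords 1 with
  | some x, some y =>
      -- for _ in range(rotation): state (newX, newY, oldX, oldY)
      let s := (PySem.List.pyRange 0 rotation 1).foldl
        (fun (st : Int × Int × Int × Int) _ =>
          let nX := st.2.2.2
          let nY := -st.2.2.1
          (nX, nY, nX, nY))
        (x, y, x, y)
      [s.1, s.2.1]
  | _, _ => []  -- IndexError in Python; excluded by Pre_get_rotated

-- ===== PORT B =====
def get_rotated_alt (coords : List Int) (rotation : Int) : List Int :=
  -- x, y = coords[0], coords[1]; out of range = IndexError, excluded by Pre_get_rotated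
  (((PySem.List.pyGet? coords 0).bind fun x =>
    (PySem.List.pyGet? coords 1).map fun y =>
      let k := if rotation > 0 then PySem.Int.mod rotation 4 else 0
      -- tuple lookup ((x,y),(y,-x),(-x,-y),(-y,x))[k], k ∈ {0,1,2,3}
      if k = 1 then [y, -x]
      else if k = 2 then [-x, -y]
      else if k = 3 then [-y, x]
      else [x, y]).getD [])

-- ===== PRECONDITION & SPEC =====
-- Pre_ excludes lists with fewer than two elements, on which A (and B) raise IndexError.
def Pre_get_rotated (coords : List Int) (rotation : Int) : Prop := 2 ≤ coords.length
instance (coords : List Int) (rotation : Int) : Decidable (Pre_get_rotated coords rotation) := by unfold Pre_get_rotated; infer_instance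
def pvWitness_get_rotated : List Int × Int := ([3, 5], 6)
def Spec_get_rotated (coords : List Int) (rotation : Int) (out : List Int) : Prop := out = get_rotated_alt coords rotation
instance (coords : List Int) (rotation : Int) (out : List Int) : Decidable (Spec_get_rotated coords rotation out) := by unfold Spec_get_rotated; infer_instance

-- ===== CLAIM (what is proved, stated in full; the proofs are below) =====
def Claim_equal_get_rotated : Prop := ∀ (coords : List Int) (rotation : Int), Dom_get_rotated coords rotation → Pre_get_rotated coords rotation → Spec_get_rotated coords rotation (get_rotated coords rotation)

-- ===== LEMMAS AND PROOFS =====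

-- the fold ignores the list elements; on doubled state it is iteration of (x,y) ↦ (y,-x)
def rotIter : Nat → Int × Int → Int × Int
  | 0, p => p
  | n + 1, p => rotIter n (p.2, -p.1)

theorem foldl_rot_eq_rotIter (l : List Int) (x y : Int) :
    l.foldl (fun (st : Int × Int × Int × Int) _ =>
        (st.2.2.2, -st.2.2.1, st.2.2.2, -st.2.2.1)) (x, y, x, y)
      = ((rotIter l.length (x, y)).1, (rotIter l.length (x, y)).2,
         (rotIter l.length (x, y)).1, (rotIter l.length (x, y)).2) := by
  induction l generalizing x y with
  | nil => simp [rotIter]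
  | cons a t ih => simp [List.foldl, rotIter, ih]

theorem rotIter_closed (n : Nat) (x y : Int) :
    rotIter n (x, y) =
      if n % 4 = 0 then (x, y)
      else if n % 4 = 1 then (y, -x)
      else if n % 4 = 2 then (-x, -y)
      else (-y, x) := by
  induction n generalizing x y with
  | zero => simp [rotIter]
  | succ n ih =>
      rw [rotIter, ih]
      have h4 : n % 4 = 0 ∨ n % 4 = 1 ∨ n % 4 = 2 ∨ n % 4 = 3 := by omega
      rcases h4 with h | h | h | h
      · have h1 : (n + 1) % 4 = 1 := by omega
        simp [h, h1]
      · have h1 : (n + 1) % 4 = 2 := by omega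
        simp [h, h1]
      · have h1 : (n + 1) % 4 = 3 := by omega
        simp [h, h1]
      · have h1 : (n + 1) % 4 = 0 := by omega
        simp [h, h1]

-- ===== VERDICT (by name: the statement is the Claim_ definition above) =====
theorem get_rotated_spec : Claim_equal_get_rotated := by
  intro coords rotation _ hpre
  unfold Spec_get_rotated get_rotated get_rotated_alt
  unfold Pre_get_rotated at hpre
  obtain ⟨x, y, t, rfl⟩ : ∃ x y t, coords = x :: y :: t := by
    match coords with
    | x :: y :: t => exact ⟨x, y, t, rfl⟩
    | [] => simp at hpre
    | [x] => simp at hpre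
  simp only [PySem.List.pyGet?, PySem.List.pyIdx?]
  norm_num
  have hle : (0:Int) ≤ (t.length:Int) + 1 := by positivity
  simp only [if_pos hle, Option.bind_some, List.getElem?_cons_zero]
  rw [foldl_rot_eq_rotIter, rotIter_closed]
  rw [PySem.List.length_pyRange_one]
  by_cases hr : rotation > 0
  · have hmod : PySem.Int.mod rotation 4 = rotation % 4 :=
      PySem.Int.mod_eq_emod_of_pos (by norm_num)
    have h4 : rotation % 4 = 0 ∨ rotation % 4 = 1 ∨ rotation % 4 = 2 ∨ rotation % 4 = 3 := by
      omega
    rcases h4 with h | h | h | h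
    · have hn : rotation.toNat % 4 = 0 := by omega
      simp [hr, h, hn]
    · have hn : rotation.toNat % 4 = 1 := by omega
      simp [hr, h, hn]
    · have hn : rotation.toNat % 4 = 2 := by omega
      simp [hr, h, hn]
    · have hn : rotation.toNat % 4 = 3 := by omega
      simp [hr, h, hn]
  · have hn : rotation.toNat % 4 = 0 := by omega
    simp [hr, hn]
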